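-- pv_equiv track=rewrite | github.com/SebastianBoehler/autoresearch_manim_finetune | mac_pipeline/repo_ingest.py | _count_custom_imports
-- ===== SOURCE A (Python) =====
-- from typing import Any
--
-- def _count_custom_imports(records: list[dict[str, Any]]) -> dict[str, int]:
--     counts: dict[str, int] = {}
--     for record in records:
--         imports = record.get("custom_imports", [])
--         if not imports:
--             counts["none"] = counts.get("none", 0) + 1
--             continue
--         for name in imports:
--             counts[name] = counts.get(name, 0) + 1
--     return dict(sorted(counts.items()))
-- ===== SOURCE B (Python) =====
-- def _count_custom_imports(records):
--     # Flatten all import names (with a "none" marker per record without imports),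
--     # sort once, then run-length encode the sorted list: keys come out already
--     # in ascending order, so the dict is built directly in sorted-key order.
--     names = []
--     for record in records:
--         imports = record.get("custom_imports", [])
--         if not imports:
--             names.append("none")
--         else:
--             names.extend(imports)
--     names.sort()
--     result = {}
--     i = 0
--     n = len(names)
--     while i < n:
--         j = i + 1
--         while j < n and names[j] == names[i]:
--             j += 1
--         result[names[i]] = j - i
--         i = j
--     return result
-- ===== Notes on version B (the rewrite author's own statement) =====
-- stated objective: alternative
-- what changed: Replaces per-name hash-dict accumulation followed by sorting the (key,count) items with: flatten all names into one list, sort it once, and run-length encode the sorted list so the counts emerge already in ascending key order.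
import Mathlib
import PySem

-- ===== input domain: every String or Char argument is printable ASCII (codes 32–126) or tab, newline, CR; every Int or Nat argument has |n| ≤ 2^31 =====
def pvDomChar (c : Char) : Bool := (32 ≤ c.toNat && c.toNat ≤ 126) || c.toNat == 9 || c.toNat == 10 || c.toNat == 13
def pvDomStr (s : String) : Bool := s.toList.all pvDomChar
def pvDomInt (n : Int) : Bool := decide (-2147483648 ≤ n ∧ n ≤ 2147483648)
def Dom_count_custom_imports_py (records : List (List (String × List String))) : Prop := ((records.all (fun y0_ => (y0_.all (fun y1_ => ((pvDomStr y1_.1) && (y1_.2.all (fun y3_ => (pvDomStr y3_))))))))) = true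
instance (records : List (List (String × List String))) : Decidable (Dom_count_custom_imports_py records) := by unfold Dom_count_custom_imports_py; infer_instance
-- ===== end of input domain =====

-- B flattens all names into one list, sorts it once and run-length encodes the sorted
-- list (counts emerge in ascending key order), instead of A's dict accumulation + final sort.


-- ===== PORT A =====
def count_custom_imports_py (records : List (List (String × List String))) : List (String × Int) :=
  let counts : PySem.Dict String Int := records.foldl
    (fun counts record =>
      let imports := PySem.Dict.getD (PySem.Dict.mk record) "custom_imports" []
      if imports.isEmpty then
        counts.insert "none" (counts.getD "none" 0 + 1)
      else
        imports.foldl (fun c name => c.insert name (c.getD name 0 + 1)) counts)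
    PySem.Dict.empty
  PySem.List.sorted2 counts.items (fun p => p.1) (fun p => p.2) false

-- ===== PORT B =====
-- run-length encoding of the sorted list: the inner `while names[j] == names[i]` scan is
-- the takeWhile run, the jump `i = j` is the dropWhile remainder
def pvGroupRuns : List String → List (String × Int)
  | [] => []
  | x :: xs =>
    (x, ((xs.takeWhile (fun y => y == x)).length : Int) + 1)
      :: pvGroupRuns (xs.dropWhile (fun y => y == x))
termination_by l => l.length
decreasing_by
  exact Nat.lt_succ_of_le (List.length_dropWhile_le _ _)

def count_custom_imports_py_alt (records : List (List (String × List String))) : List (String × Int) :=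
  let names : List String := records.foldl
    (fun acc record =>
      let imports := PySem.Dict.getD (PySem.Dict.mk record) "custom_imports" []
      if imports.isEmpty then acc ++ ["none"] else acc ++ imports)
    []
  pvGroupRuns (PySem.List.sorted names (fun x => x) false)

-- ===== PRECONDITION & SPEC =====
def Spec_count_custom_imports_py (records : List (List (String × List String))) (out : List (String × Int)) : Prop := out = count_custom_imports_py_alt records
instance (records : List (List (String × List String))) (out : List (String × Int)) : Decidable (Spec_count_custom_imports_py records out) := by unfold Spec_count_custom_imports_py; infer_instance

-- ===== CLAIM (what is proved, stated in full; the proofs are below) =====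
def Claim_equal_count_custom_imports_py : Prop := ∀ (records : List (List (String × List String))), Dom_count_custom_imports_py records → Spec_count_custom_imports_py records (count_custom_imports_py records)

-- ===== LEMMAS AND PROOFS =====

-- the flat list of names both programs conceptually traverse
def pvF (records : List (List (String × List String))) : List String :=
  records.flatMap (fun record =>
    let imports := PySem.Dict.getD (PySem.Dict.mk record) "custom_imports" []
    if imports.isEmpty then ["none"] else imports)

-- Python's tuple comparison on (str, int) pairs as used by sorted2
def pvLt2 (a b : String × Int) : Bool :=
  decide (a.1 < b.1) || (!decide (b.1 < a.1) && decide (a.2 < b.2))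

lemma pvLt2_iff (a b : String × Int) :
    pvLt2 a b = true ↔ a.1 < b.1 ∨ (a.1 = b.1 ∧ a.2 < b.2) := by
  simp only [pvLt2, Bool.or_eq_true, Bool.and_eq_true, Bool.not_eq_true',
    decide_eq_true_iff, decide_eq_false_iff_not]
  constructor
  · rintro (h | ⟨h1, h2⟩)
    · exact Or.inl h
    · rcases lt_trichotomy a.1 b.1 with h' | h' | h'
      · exact Or.inl h'
      · exact Or.inr ⟨h', h2⟩
      · exact absurd h' h1
  · rintro (h | ⟨h1, h2⟩)
    · exact Or.inl h
    · exact Or.inr ⟨by rw [h1]; exact lt_irrefl _, h2⟩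

lemma pvLt2_asymm {a b : String × Int} (h : pvLt2 a b = true) : pvLt2 b a = false := by
  rw [Bool.eq_false_iff]
  intro h'
  rw [pvLt2_iff] at h h'
  rcases h with h | ⟨h1, h2⟩ <;> rcases h' with h' | ⟨h1', h2'⟩
  · exact absurd h' (lt_asymm h)
  · exact absurd h (by rw [h1']; exact lt_irrefl _)
  · exact absurd h' (by rw [h1]; exact lt_irrefl _)
  · exact absurd h2' (lt_asymm h2)

lemma pvLt2_trans {a b c : String × Int} (h1 : pvLt2 a b = true) (h2 : pvLt2 b c = true) :
    pvLt2 a c = true := by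
  rw [pvLt2_iff] at h1 h2 ⊢
  rcases h1 with h1 | ⟨h1, h1'⟩ <;> rcases h2 with h2 | ⟨h2, h2'⟩
  · exact Or.inl (lt_trans h1 h2)
  · exact Or.inl (h2 ▸ h1)
  · exact Or.inl (h1 ▸ h2)
  · exact Or.inr ⟨h1.trans h2, lt_trans h1' h2'⟩

lemma pvLt2_antisymm {a b : String × Int} (h1 : pvLt2 a b = false) (h2 : pvLt2 b a = false) :
    a = b := by
  have h1' : ¬(a.1 < b.1 ∨ (a.1 = b.1 ∧ a.2 < b.2)) := by rw [← pvLt2_iff]; simp [h1]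
  have h2' : ¬(b.1 < a.1 ∨ (b.1 = a.1 ∧ b.2 < a.2)) := by rw [← pvLt2_iff]; simp [h2]
  have hfst : a.1 = b.1 :=
    le_antisymm (not_lt.mp fun h => h2' (Or.inl h)) (not_lt.mp fun h => h1' (Or.inl h))
  have hsnd : a.2 = b.2 :=
    le_antisymm (not_lt.mp fun h => h2' (Or.inr ⟨hfst.symm, h⟩))
      (not_lt.mp fun h => h1' (Or.inr ⟨hfst, h⟩))
  exact Prod.ext hfst hsnd

-- the relation left invariant by insertion sort
def pvR (a b : String × Int) : Prop := pvLt2 b a = false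

lemma insertBy_perm {α : Type} (before : α → α → Bool) (x : α) (ys : List α) :
    (PySem.List.insertBy before x ys).Perm (x :: ys) := by
  induction ys with
  | nil => exact List.Perm.refl _
  | cons y ys ih =>
    simp only [PySem.List.insertBy]
    split
    · exact List.Perm.refl _
    · exact (ih.cons y).trans (List.Perm.swap x y ys)

lemma foldl_insertBy_perm {α : Type} (before : α → α → Bool) (xs acc : List α) :
    (xs.foldl (fun a x => PySem.List.insertBy before x a) acc).Perm (acc ++ xs) := by
  induction xs generalizing acc with
  | nil => simp
  | cons x xs ih =>
    simp only [List.foldl_cons]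
    exact (ih _).trans (((insertBy_perm before x acc).append_right xs).trans
      List.perm_middle.symm)

lemma insertBy_pairwise (x : String × Int) (ys : List (String × Int))
    (h : ys.Pairwise pvR) : (PySem.List.insertBy pvLt2 x ys).Pairwise pvR := by
  induction ys with
  | nil => simp [PySem.List.insertBy, pvR]
  | cons y ys ih =>
    rw [List.pairwise_cons] at h
    simp only [PySem.List.insertBy]
    split
    · rename_i hlt
      refine List.pairwise_cons.mpr ⟨?_, List.pairwise_cons.mpr h⟩
      intro z hz
      rcases List.mem_cons.mp hz with rfl | hz
      · exact pvLt2_asymm hlt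
      · -- z after y: pvLt2 z y = false; if pvLt2 z x then pvLt2 z y by trans — contra
        show pvLt2 z x = false
        rw [Bool.eq_false_iff]
        intro hzx
        have hzy : pvLt2 z y = true := pvLt2_trans hzx hlt
        have hzy' : pvLt2 z y = false := h.1 z hz
        simp [hzy'] at hzy
    · rename_i hlt
      refine List.pairwise_cons.mpr ⟨?_, ih h.2⟩
      intro z hz
      rcases (PySem.List.mem_insertBy _ _ _ _).mp hz with rfl | hz
      · show pvLt2 z y = false
        simpa using hlt
      · exact h.1 z hz

lemma foldl_insertBy_pairwise (xs acc : List (String × Int))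
    (h : acc.Pairwise pvR) :
    (xs.foldl (fun a x => PySem.List.insertBy pvLt2 x a) acc).Pairwise pvR := by
  induction xs generalizing acc with
  | nil => exact h
  | cons x xs ih => exact ih _ (insertBy_pairwise x acc h)

-- insertion sort with Python's tuple comparison is determined by: any permutation of
-- the input that is strictly increasing in the first component
lemma sorted2_eq (xs ys : List (String × Int)) (hperm : ys.Perm xs)
    (hys : ys.Pairwise (fun a b => a.1 < b.1)) :
    PySem.List.sorted2 xs (fun p => p.1) (fun p => p.2) false = ys := by
  have hdef : PySem.List.sorted2 xs (fun p => p.1) (fun p => p.2) false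
      = xs.foldl (fun a x => PySem.List.insertBy pvLt2 x a) [] := rfl
  rw [hdef]
  have hp : (xs.foldl (fun a x => PySem.List.insertBy pvLt2 x a) []).Perm ys :=
    ((foldl_insertBy_perm pvLt2 xs []).trans (by simp)).trans hperm.symm
  have hs1 : (xs.foldl (fun a x => PySem.List.insertBy pvLt2 x a) []).Pairwise pvR :=
    foldl_insertBy_pairwise xs [] (by simp)
  have hs2 : ys.Pairwise pvR := by
    refine hys.imp ?_
    intro a b hab
    show pvLt2 b a = false
    rw [Bool.eq_false_iff]
    intro h
    rcases (pvLt2_iff b a).mp h with h' | ⟨h', _⟩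
    · exact absurd hab (lt_asymm h')
    · exact absurd hab (by rw [h']; exact lt_irrefl _)
  exact List.eq_of_perm_of_sorted (le := pvR)
    (fun a b _ _ hab hba => pvLt2_antisymm hba hab) hs1 hs2 hp

-- ---- A's accumulation loop is counting along the flat list ----

lemma a_loop_eq (records : List (List (String × List String))) (d : PySem.Dict String Int) :
    records.foldl
      (fun counts record =>
        let imports := PySem.Dict.getD (PySem.Dict.mk record) "custom_imports" []
        if imports.isEmpty then
          counts.insert "none" (counts.getD "none" 0 + 1)
        else
          imports.foldl (fun c name => c.insert name (c.getD name 0 + 1)) counts) d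
    = (pvF records).foldl (fun c name => c.insert name (c.getD name 0 + 1)) d := by
  induction records generalizing d with
  | nil => simp [pvF]
  | cons r rs ih =>
    simp only [pvF, List.flatMap_cons, List.foldl_append, List.foldl_cons] at *
    rw [ih]
    congr 1
    split <;> simp_all

-- ---- B's flattening loop builds pvF ----

lemma b_loop_eq (records : List (List (String × List String))) (acc : List String) :
    records.foldl
      (fun acc record =>
        let imports := PySem.Dict.getD (PySem.Dict.mk record) "custom_imports" []
        if imports.isEmpty then acc ++ ["none"] else acc ++ imports) acc
    = acc ++ pvF records := by
  induction records generalizing acc with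
  | nil => simp [pvF]
  | cons r rs ih =>
    simp only [pvF, List.flatMap_cons, List.foldl_cons] at *
    rw [ih]
    split <;> simp_all

-- ---- run-length encoding of a sorted list ----

lemma set_update_cons (l : List String) (s : List String) (x : String) (hx : x ∉ l) :
    PySem.Set.update (x :: s) l = x :: PySem.Set.update s l := by
  induction l generalizing s with
  | nil => rfl
  | cons a l ih =>
    have hax : a ≠ x := fun h => hx (h ▸ List.mem_cons_self)
    have hx' : x ∉ l := fun h => hx (List.mem_cons_of_mem a h)
    simp only [PySem.Set.update, List.foldl_cons] at *
    have hadd : PySem.Set.add (x :: s) a =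
        if PySem.Set.contains s a = true then x :: s else x :: (s ++ [a]) := by
      simp only [PySem.Set.add, PySem.Set.contains, List.contains_cons]
      have hbeq : (a == x) = false := by simpa using hax
      rw [hbeq]
      simp only [Bool.false_or]
      split <;> rfl
    rw [hadd]
    by_cases h : PySem.Set.contains s a = true
    · rw [if_pos h, ih s hx']
      have ha : PySem.Set.add s a = s := by
        simp only [PySem.Set.add]; rw [if_pos h]
      rw [ha]
    · rw [if_neg h, ih _ hx']
      have ha : PySem.Set.add s a = s ++ [a] := by
        simp only [PySem.Set.add]; rw [if_neg h]
      rw [ha]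

lemma set_update_const (T : List String) (x : String) (hT : ∀ t ∈ T, t = x) :
    PySem.Set.update [x] T = [x] := by
  induction T with
  | nil => rfl
  | cons t T ih =>
    have ht : t = x := hT t List.mem_cons_self
    simp only [PySem.Set.update, List.foldl_cons] at *
    have : PySem.Set.add [x] t = [x] := by
      simp [PySem.Set.add, PySem.Set.contains, ht]
    rw [this]
    exact ih (fun t ht' => hT t (List.mem_cons_of_mem _ ht'))

lemma pvDropHead {α : Type} (p : α → Bool) (l : List α) {d : α} {D' : List α}
    (h : l.dropWhile p = d :: D') : p d = false := by
  induction l with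
  | nil => simp at h
  | cons a l ih =>
    rw [List.dropWhile_cons] at h
    by_cases hp : p a = true
    · rw [if_pos hp] at h; exact ih h
    · rw [if_neg hp] at h
      cases h
      simpa using hp

lemma group_sorted (S : List String) (h : S.Pairwise (· ≤ ·)) :
    (PySem.Set.ofList S).Pairwise (· < ·) ∧
    pvGroupRuns S = (PySem.Set.ofList S).map (fun k => (k, (S.count k : Int))) := by
  induction S using pvGroupRuns.induct with
  | case1 => simp [pvGroupRuns, PySem.Set.ofList]
  | case2 x xs ih =>
    rw [List.pairwise_cons] at h
    set T := xs.takeWhile (fun y => y == x) with hTdef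
    set D := xs.dropWhile (fun y => y == x) with hDdef
    have hTD : T ++ D = xs := List.takeWhile_append_dropWhile
    have hT : ∀ t ∈ T, t = x := by
      intro t ht
      have := List.mem_takeWhile_imp ht
      simpa using this
    have hDle : ∀ y ∈ D, x ≤ y := fun y hy =>
      h.1 y ((List.dropWhile_sublist _).subset hy)
    have hDpw : D.Pairwise (· ≤ ·) := List.Pairwise.sublist (List.dropWhile_sublist _) h.2
    have hDlt : ∀ y ∈ D, x < y := by
      intro y hy
      cases hD : D with
      | nil => simp [hD] at hy
      | cons d D' =>
        have hd : (fun y => y == x) d = false :=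
          pvDropHead (fun y => y == x) xs (hDdef.symm.trans hD)
        have hdx : d ≠ x := by simpa using hd
        have hxd : x < d := lt_of_le_of_ne (hDle d (by rw [hD]; exact List.mem_cons_self)) (Ne.symm hdx)
        rw [hD] at hy
        rcases List.mem_cons.mp hy with rfl | hy'
        · exact hxd
        · have : d ≤ y := by
            rw [hD] at hDpw
            exact (List.pairwise_cons.mp hDpw).1 y hy'
          exact lt_of_lt_of_le hxd this
    have hxD : x ∉ D := fun hmem => absurd (hDlt x hmem) (lt_irrefl x)
    -- Set.ofList (x :: xs) = x :: Set.ofList D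
    have hset : PySem.Set.ofList (x :: xs) = x :: PySem.Set.ofList D := by
      have h1 : PySem.Set.ofList (x :: xs) = PySem.Set.update [x] xs := by
        simp [PySem.Set.ofList_eq_foldl, PySem.Set.update, PySem.Set.add, PySem.Set.contains]
      rw [h1, ← hTD]
      have h2 : PySem.Set.update [x] (T ++ D) = PySem.Set.update (PySem.Set.update [x] T) D := by
        simp [PySem.Set.update, List.foldl_append]
      rw [h2, set_update_const T x hT, set_update_cons D [] x hxD]
      congr 1
    have ihD := ih hDpw
    constructor
    · rw [hset]
      refine List.pairwise_cons.mpr ⟨?_, ihD.1⟩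
      intro y hy
      exact hDlt y ((PySem.Set.mem_ofList D y).mp hy)
    · rw [pvGroupRuns, hset]
      simp only [List.map_cons]
      congr 1
      · -- head: count of x in x :: xs is T.length + 1
        have hcT : T.count x = T.length := List.count_eq_length.mpr (fun b hb => (hT b hb).symm)
        have hcD : D.count x = 0 := List.count_eq_zero.mpr hxD
        have : (x :: xs).count x = T.length + 1 := by
          rw [List.count_cons_self, ← hTD, List.count_append, hcT, hcD]
        rw [this, ← hTdef]
        push_cast
        ring_nf
      · rw [ihD.2]
        refine List.map_congr_left ?_
        intro k hk
        have hkD : k ∈ D := (PySem.Set.mem_ofList D k).mp hk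
        have hkx : k ≠ x := fun hkx => absurd (hDlt k hkD) (hkx ▸ lt_irrefl x)
        have hcT : T.count k = 0 := List.count_eq_zero.mpr
          (fun hmem => hkx (hT k hmem))
        have : (x :: xs).count k = D.count k := by
          rw [List.count_cons_of_ne (Ne.symm hkx), ← hTD, List.count_append, hcT]
          omega
        rw [this]

-- ===== VERDICT (by name: the statement is the Claim_ definition above) =====
theorem count_custom_imports_py_spec : Claim_equal_count_custom_imports_py := by
  intro records _
  show count_custom_imports_py records = count_custom_imports_py_alt records
  unfold count_custom_imports_py count_custom_imports_py_alt
  rw [a_loop_eq, b_loop_eq, PySem.Dict.foldl_insert_getD_add_one_eq_counter]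
  show PySem.List.sorted2 (PySem.Dict.counter (pvF records)).items
      (fun p => p.1) (fun p => p.2) false
    = pvGroupRuns (PySem.List.sorted ([] ++ pvF records) (fun x => x) false)
  rw [PySem.Dict.items_counter]
  simp only [List.nil_append]
  set F := pvF records with hF
  set S := PySem.List.sorted F (fun x => x) false with hS
  have hSperm : S.Perm F := PySem.List.sorted_perm F _ false
  have hSpw : S.Pairwise (· ≤ ·) := PySem.List.sorted_pairwise F (fun x => x)
  obtain ⟨hlt, hgr⟩ := group_sorted S hSpw
  rw [hgr]
  -- rewrite counts over S into counts over F (S is a permutation of F)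
  have hmap : (PySem.Set.ofList S).map (fun k => (k, (S.count k : Int)))
      = (PySem.Set.ofList S).map (fun k => (k, (F.count k : Int))) :=
    List.map_congr_left (fun k _ => by rw [hSperm.count_eq k])
  rw [hmap]
  refine sorted2_eq _ _ ?_ ?_
  · refine List.Perm.map _ ?_
    rw [List.perm_ext_iff_of_nodup (PySem.Set.nodup_ofList S) (PySem.Set.nodup_ofList F)]
    intro a
    rw [PySem.Set.mem_ofList, PySem.Set.mem_ofList, PySem.List.mem_sorted]
  · exact hlt.map _ (fun {a b} h => h)
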